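-- pv_equiv track=rewrite | github.com/Mirolee7/GUI-projects | gui_calculator_2/calculator/evaluation/evaluate.py | detect_operators
-- ===== SOURCE A (Python) =====
-- def detect_operators(input_list: list):
--     # This function is not in use at the moment
--     # It is meant to be used for other calculator modules, like add, mul
--     # This function will help determine whether to switch between calculator module operators.
--     # You can get creative with it.
--     # Set of possible operators
--     valid_operators = {'+', '-', '*', '/'}
--
--     # Use a set to store the unique operators found in the list
--     operators_found = set()
--
--     for token in input_list:
--         if token in valid_operators:
--             operators_found.add(token)
--
--     # Check the number of unique operators found
--     if len(operators_found) <= 1: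
--         # If one operator was found, pop it from the set to return it
--         operator = operators_found.pop() if operators_found else None
--         return True, operator
--     else:
--         # If more than one unique operator was found
--         return False, False
-- ===== SOURCE B (Python) =====
-- def detect_operators(input_list: list):
--     # One pass with a scalar slot and early exit instead of collecting a set.
--     seen = None
--     for token in input_list:
--         if token in ('+', '-', '*', '/'):
--             if seen is None:
--                 seen = token
--             elif token != seen:
--                 return False, False
--     return True, seen
-- ===== Notes on version B (the rewrite author's own statement) =====
-- stated objective: simpler
-- what changed: B replaces A's build-a-set-then-count-then-pop pipeline by a single pass that keeps one scalar slot for the first operator seen and returns early on a second distinct operator; A's and B's Python agree on every input, including the (False, False) branch.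
-- outside the precondition, e.g. on detect_operators(['+', '-']): A returns (False, False), B returns (False, False)
import Mathlib
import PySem

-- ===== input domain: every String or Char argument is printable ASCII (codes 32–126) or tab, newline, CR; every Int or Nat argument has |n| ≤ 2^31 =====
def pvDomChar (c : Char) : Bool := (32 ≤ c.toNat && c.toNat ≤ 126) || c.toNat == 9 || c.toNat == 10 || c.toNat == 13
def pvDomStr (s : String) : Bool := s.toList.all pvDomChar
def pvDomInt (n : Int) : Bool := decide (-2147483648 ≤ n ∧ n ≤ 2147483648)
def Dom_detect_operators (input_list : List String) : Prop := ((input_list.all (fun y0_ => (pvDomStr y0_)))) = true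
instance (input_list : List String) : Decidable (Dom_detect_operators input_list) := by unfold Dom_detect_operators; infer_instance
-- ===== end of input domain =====

-- B does one pass keeping a scalar slot for the (unique) operator, with early exit,
-- instead of A's collect-a-set / count / pop pipeline; objective: simpler.
-- A's and B's PYTHON agree on every input (both return (False, False) on two distinct
-- operators); the two PORTS are proved equal on ALL inputs (lemma ports_agree below).

-- ===== PORT A =====
-- valid_operators = {'+', '-', '*', '/'}
def pvValidOps : PySem.Set String := PySem.Set.ofList ["+", "-", "*", "/"]

def detect_operators (input_list : List String) : Bool × Option String :=
  -- for token in input_list: if token in valid_operators: operators_found.add(token)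
  let operators_found : PySem.Set String :=
    input_list.foldl (fun s token =>
      if PySem.Set.contains pvValidOps token then PySem.Set.add s token else s)
      PySem.Set.empty
  if PySem.Set.len operators_found ≤ 1 then
    -- pop on a ≤1-element set is its unique element (or None when empty): head?
    (true, operators_found.head?)
  else
    -- Python returns (False, False): the bool False in the second slot, not a value
    -- of Option String — these inputs are outside Pre_detect_operators; ported (false, none).
    (false, none)

-- ===== PORT B =====
-- the for-loop of Source B with its early return, as structural recursion over the list;
-- Source B's early return (False, False) carries the bool False, ported as (false, none)
def detect_operators_altLoop : List String → Option String → Bool × Option String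
  | [], seen => (true, seen)
  | token :: rest, seen =>
    if token = "+" ∨ token = "-" ∨ token = "*" ∨ token = "/" then
      match seen with
      | none => detect_operators_altLoop rest (some token)
      | some s => if token ≠ s then (false, none) else detect_operators_altLoop rest (some s)
    else detect_operators_altLoop rest seen

def detect_operators_alt (input_list : List String) : Bool × Option String :=
  detect_operators_altLoop input_list none

-- ===== PRECONDITION & SPEC =====
-- Pre_ excludes exactly the inputs containing two DISTINCT arithmetic operators: there BOTH
-- Pythons return the same value (False, False), whose second component is the bool False — not a
-- value of the declared Option-String result type, so it cannot be expressed here; the ports are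
-- nevertheless proved equal on those inputs too (ports_agree needs no precondition).
def Pre_detect_operators (input_list : List String) : Prop :=
  ∀ a ∈ input_list, ∀ b ∈ input_list,
    a ∈ (["+", "-", "*", "/"] : List String) → b ∈ (["+", "-", "*", "/"] : List String) → a = b
instance (input_list : List String) : Decidable (Pre_detect_operators input_list) := by
  unfold Pre_detect_operators; infer_instance

def pvWitness_detect_operators : List String := ["1", "+", "2", "+", "3"]

def Spec_detect_operators (input_list : List String) (out : Bool × Option String) : Prop := out = detect_operators_alt input_list
instance (input_list : List String) (out : Bool × Option String) : Decidable (Spec_detect_operators input_list out) := by unfold Spec_detect_operators; infer_instance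

-- ===== CLAIM (what is proved, stated in full; the proofs are below) =====
def Claim_equal_detect_operators : Prop := ∀ (input_list : List String), Dom_detect_operators input_list → Pre_detect_operators input_list → Spec_detect_operators input_list (detect_operators input_list)

-- ===== LEMMAS AND PROOFS =====

-- abbreviations used only by the proofs
def pvOps : List String := ["+", "-", "*", "/"]

def pvStepA (s : PySem.Set String) (token : String) : PySem.Set String :=
  if PySem.Set.contains pvValidOps token then PySem.Set.add s token else s

lemma pvContains_valid (t : String) :
    PySem.Set.contains pvValidOps t = decide (t ∈ pvOps) := by
  have h1 : pvValidOps = pvOps := by decide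
  rw [h1]
  simp [pvOps, PySem.Set.contains]

lemma mem_ops_iff (t : String) :
    (t = "+" ∨ t = "-" ∨ t = "*" ∨ t = "/") ↔ t ∈ pvOps := by
  simp [pvOps]

-- membership in the accumulator survives A's fold
lemma mem_foldA (l : List String) (acc : PySem.Set String) (a : String) (ha : a ∈ acc) :
    a ∈ l.foldl pvStepA acc := by
  induction l generalizing acc with
  | nil => exact ha
  | cons t rest ih =>
    rw [List.foldl_cons]
    refine ih _ ?_
    unfold pvStepA PySem.Set.add
    split_ifs <;> simp [ha]

-- one-step unfoldings of B's loop (definitional)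
lemma altLoop_cons_none (t : String) (rest : List String) :
    detect_operators_altLoop (t :: rest) none =
      if t = "+" ∨ t = "-" ∨ t = "*" ∨ t = "/" then detect_operators_altLoop rest (some t)
      else detect_operators_altLoop rest none := rfl

lemma altLoop_cons_some (t : String) (rest : List String) (s : String) :
    detect_operators_altLoop (t :: rest) (some s) =
      if t = "+" ∨ t = "-" ∨ t = "*" ∨ t = "/" then
        (if t ≠ s then (false, none) else detect_operators_altLoop rest (some s))
      else detect_operators_altLoop rest (some s) := rfl

-- A's tail computation, phrased on an arbitrary accumulator of at most one element,
-- equals B's loop continued from the corresponding scalar slot — on EVERY input.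
lemma loop_eq (l : List String) (acc : PySem.Set String)
    (hacc : acc = [] ∨ ∃ x, acc = [x]) :
    detect_operators_altLoop l acc.head? =
      (if PySem.Set.len (l.foldl pvStepA acc) ≤ 1
       then (true, (l.foldl pvStepA acc).head?) else (false, none)) := by
  induction l generalizing acc with
  | nil =>
    rcases hacc with h | ⟨x, h⟩ <;> subst h <;> simp [detect_operators_altLoop, PySem.Set.len]
  | cons t rest ih =>
    rw [List.foldl_cons]
    by_cases ht : t ∈ pvOps
    · have hcond : (t = "+" ∨ t = "-" ∨ t = "*" ∨ t = "/") := (mem_ops_iff t).mpr ht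
      have hadd : pvStepA acc t = PySem.Set.add acc t := by
        unfold pvStepA; rw [pvContains_valid t, decide_eq_true ht, if_pos rfl]
      rcases hacc with h | ⟨x, h⟩
      · -- accumulator empty: both lock onto t
        subst h
        have h1 : PySem.Set.add ([] : PySem.Set String) t = [t] := by
          simp [PySem.Set.add, PySem.Set.contains]
        rw [hadd, h1, List.head?_nil, altLoop_cons_none, if_pos hcond]
        simpa using ih [t] (Or.inr ⟨t, rfl⟩)
      · subst h
        by_cases htx : t = x
        · -- same operator again: A's set and B's slot both unchanged
          subst htx
          have h1 : PySem.Set.add ([t] : PySem.Set String) t = [t] := by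
            simp [PySem.Set.add, PySem.Set.contains]
          rw [hadd, h1, List.head?_cons, altLoop_cons_some, if_pos hcond,
            if_neg (by simp)]
          simpa using ih [t] (Or.inr ⟨t, rfl⟩)
        · -- a second distinct operator: B exits now, A's final set keeps both
          have h1 : PySem.Set.add ([x] : PySem.Set String) t = [x, t] := by
            simp [PySem.Set.add, PySem.Set.contains, htx]
          rw [hadd, h1, List.head?_cons, altLoop_cons_some, if_pos hcond,
            if_pos htx]
          have hx : x ∈ rest.foldl pvStepA [x, t] := mem_foldA _ _ _ (by simp)
          have htm : t ∈ rest.foldl pvStepA [x, t] := mem_foldA _ _ _ (by simp)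
          have hlen : ¬ PySem.Set.len (rest.foldl pvStepA [x, t]) ≤ 1 := by
            unfold PySem.Set.len
            match hS : rest.foldl pvStepA [x, t] with
            | [] => rw [hS] at hx; simp at hx
            | [a] =>
              rw [hS] at hx htm
              simp only [List.mem_singleton] at hx htm
              exact absurd (htm.trans hx.symm) htx
            | a :: b :: s => simp only [List.length_cons]; push_cast; omega
          rw [if_neg hlen]
    · have hcond : ¬ (t = "+" ∨ t = "-" ∨ t = "*" ∨ t = "/") :=
        fun h => ht ((mem_ops_iff t).mp h)
      have hskip : pvStepA acc t = acc := by
        unfold pvStepA; rw [pvContains_valid t, decide_eq_false ht]; simp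
      rw [hskip]
      rcases hacc with h | ⟨x, h⟩ <;> subst h
      · rw [List.head?_nil, altLoop_cons_none, if_neg hcond]
        simpa using ih [] (Or.inl rfl)
      · rw [List.head?_cons, altLoop_cons_some, if_neg hcond]
        simpa using ih [x] (Or.inr ⟨x, rfl⟩)

-- the two ports agree on EVERY input (no precondition needed at port level)
lemma ports_agree (l : List String) : detect_operators l = detect_operators_alt l := by
  unfold detect_operators detect_operators_alt
  have h := loop_eq l [] (Or.inl rfl)
  simp only [List.head?_nil] at h
  exact h.symm

-- ===== VERDICT (by name: the statement is the Claim_ definition above) =====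
theorem detect_operators_spec : Claim_equal_detect_operators := by
  intro l _ _
  unfold Spec_detect_operators
  exact ports_agree l
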